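-- pv_equiv track=rewrite | github.com/Yankai-Jia/FAQs-Semantic-Matcher- | Semantic_matcher.py | maching
-- ===== SOURCE A (Python) =====
-- def maching(combined_pair, user_words):
--     # statitically matching
--     match_num = 0
--     matched_num_dict = {}
--     i = 1
--
--     for combined_QA in combined_pair:
--         for user_word in user_words:
--             if (user_word.lower() in [x.lower() for x in combined_QA]):
--                 match_num = match_num + 1
--         matched_num_dict[i] = match_num
--         match_num = 0
--         i = i + 1
--     matched_words_dict = {}
--     matched_words_list = []
--     j = 1
--     for combined_QA in combined_pair:
--         for user_word in user_words:
--             if (user_word.lower() in [x.lower() for x in combined_QA]):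
--                 matched_words_list.append(user_word)
--         matched_words_dict[j] = matched_words_list
--         matched_words_list = []
--         j = j + 1
--     return matched_num_dict, matched_words_dict
-- ===== SOURCE B (Python) =====
-- def maching(combined_pair, user_words):
--     # Transposed (word-major) traversal: lower each user word once, then walk
--     # the precomputed lowered pair-sets, incrementing counts and appending
--     # matches into per-pair accumulators; dicts are built at the end.
--     lowered = [{x.lower() for x in qa} for qa in combined_pair]
--     counts = [0] * len(combined_pair)
--     words = [[] for _ in combined_pair]
--     for w in user_words:
--         lw = w.lower()
--         for k, s in enumerate(lowered):
--             if lw in s: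
--                 counts[k] += 1
--                 words[k].append(w)
--     matched_num_dict = {i: c for i, c in enumerate(counts, 1)}
--     matched_words_dict = {i: ws for i, ws in enumerate(words, 1)}
--     return matched_num_dict, matched_words_dict
-- ===== Notes on version B (the rewrite author's own statement) =====
-- stated objective: faster
-- what changed: Transposes the traversal: instead of A's two pair-major nested double-loops that re-lower the whole QA pair for every user word, B lowers each pair once into a set, then makes one word-major pass that lowers each user word once and updates per-pair count/word accumulators, building both dicts at the end.
import Mathlib
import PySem

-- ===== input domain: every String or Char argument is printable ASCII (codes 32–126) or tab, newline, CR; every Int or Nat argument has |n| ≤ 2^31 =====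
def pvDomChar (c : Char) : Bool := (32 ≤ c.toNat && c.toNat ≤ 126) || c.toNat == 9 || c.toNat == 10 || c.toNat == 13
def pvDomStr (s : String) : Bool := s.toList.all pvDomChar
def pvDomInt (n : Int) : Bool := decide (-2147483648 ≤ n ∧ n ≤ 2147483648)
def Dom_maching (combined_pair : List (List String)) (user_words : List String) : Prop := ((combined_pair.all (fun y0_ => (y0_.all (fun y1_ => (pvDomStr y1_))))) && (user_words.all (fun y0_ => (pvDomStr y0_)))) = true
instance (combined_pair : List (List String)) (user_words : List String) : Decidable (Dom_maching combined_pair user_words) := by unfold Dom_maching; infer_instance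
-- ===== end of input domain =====

-- B transposes A's pair-major double loops into one word-major pass over
-- precomputed lowered sets, updating per-pair accumulators (objective: faster).

-- ===== PORT A =====
-- first loop body: count matches, insert at i, reset counter
def machingStep1 (user_words : List String) (st : Int × PySem.Dict Int Int × Int)
    (combined_QA : List String) : Int × PySem.Dict Int Int × Int :=
  let match_num := user_words.foldl
    (fun m user_word => if PySem.Str.lower user_word ∈ combined_QA.map PySem.Str.lower then m + 1 else m)
    st.1
  (0, st.2.1.insert st.2.2 match_num, st.2.2 + 1)

-- second loop body: append matching words, insert at j, reset list
def machingStep2 (user_words : List String) (st : PySem.Dict Int (List String) × List String × Int)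
    (combined_QA : List String) : PySem.Dict Int (List String) × List String × Int :=
  let lst := user_words.foldl
    (fun l user_word => if PySem.Str.lower user_word ∈ combined_QA.map PySem.Str.lower then l ++ [user_word] else l)
    st.2.1
  (st.1.insert st.2.2 lst, [], st.2.2 + 1)

def maching (combined_pair : List (List String)) (user_words : List String) :
    (List (Int × Int)) × (List (Int × List String)) :=
  ((combined_pair.foldl (machingStep1 user_words) (0, PySem.Dict.empty, 1)).2.1.items,
   (combined_pair.foldl (machingStep2 user_words) (PySem.Dict.empty, [], 1)).1.items)

-- ===== PORT B =====
-- inner loop of the word-major pass: update each pair's (count, words) accumulator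
def machingAltUpdate (loweredSets : List (PySem.Set String)) (st : List (Int × List String))
    (w : String) : List (Int × List String) :=
  let lw := PySem.Str.lower w
  List.zipWith (fun s cm => if PySem.Set.contains s lw then (cm.1 + 1, cm.2 ++ [w]) else cm)
    loweredSets st

-- the two final dict comprehensions (1-based enumerate)
def machingAltDict1 (final : List (Int × List String)) : PySem.Dict Int Int :=
  (final.foldl (fun (p : PySem.Dict Int Int × Int) cm => (p.1.insert p.2 cm.1, p.2 + 1))
    (PySem.Dict.empty, 1)).1

def machingAltDict2 (final : List (Int × List String)) : PySem.Dict Int (List String) :=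
  (final.foldl (fun (p : PySem.Dict Int (List String) × Int) cm => (p.1.insert p.2 cm.2, p.2 + 1))
    (PySem.Dict.empty, 1)).1

def maching_alt (combined_pair : List (List String)) (user_words : List String) :
    (List (Int × Int)) × (List (Int × List String)) :=
  let loweredSets := combined_pair.map (fun qa => PySem.Set.ofList (qa.map PySem.Str.lower))
  let init : List (Int × List String) := combined_pair.map (fun _ => ((0 : Int), ([] : List String)))
  let final := user_words.foldl (machingAltUpdate loweredSets) init
  ((machingAltDict1 final).items, (machingAltDict2 final).items)

-- ===== PRECONDITION & SPEC =====
def Spec_maching (combined_pair : List (List String)) (user_words : List String) (out : (List (Int × Int)) × (List (Int × List String))) : Prop := out = maching_alt combined_pair user_words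
instance (combined_pair : List (List String)) (user_words : List String) (out : (List (Int × Int)) × (List (Int × List String))) : Decidable (Spec_maching combined_pair user_words out) := by unfold Spec_maching; infer_instance

-- ===== CLAIM =====
def Claim_equal_maching : Prop := ∀ (combined_pair : List (List String)) (user_words : List String), Dom_maching combined_pair user_words → Spec_maching combined_pair user_words (maching combined_pair user_words)

-- ===== LEMMAS AND PROOFS =====

-- the per-pair step the word-major pass performs at one pair
def machingPairStep (s : PySem.Set String) (cm : Int × List String) (w : String) : Int × List String :=
  if PySem.Set.contains s (PySem.Str.lower w) then (cm.1 + 1, cm.2 ++ [w]) else cm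

-- the word-major fold decomposes pointwise over the state list
theorem maching_fold_nil (words : List String) :
    words.foldl (machingAltUpdate []) [] = [] := by
  induction words with
  | nil => rfl
  | cons w ws ih => simpa [machingAltUpdate] using ih

theorem maching_fold_cons (l : PySem.Set String) (ls : List (PySem.Set String)) :
    ∀ (words : List String) (c : Int × List String) (st : List (Int × List String)),
      words.foldl (machingAltUpdate (l :: ls)) (c :: st)
        = (words.foldl (machingPairStep l) c) :: (words.foldl (machingAltUpdate ls) st) := by
  intro words
  induction words with
  | nil => intro c st; rfl
  | cons w ws ih =>
    intro c st
    simp only [List.foldl_cons]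
    rw [show machingAltUpdate (l :: ls) (c :: st) w
        = machingPairStep l c w :: machingAltUpdate ls st w from rfl]
    exact ih _ _

-- the per-pair word fold splits into A's two inner folds (count and collect)
theorem maching_pairstep_split (qa : List String) :
    ∀ (words : List String) (c : Int) (m : List String),
      words.foldl (machingPairStep (PySem.Set.ofList (qa.map PySem.Str.lower))) (c, m)
        = (words.foldl
            (fun acc w => if PySem.Str.lower w ∈ qa.map PySem.Str.lower then acc + 1 else acc) c,
           words.foldl
            (fun acc w => if PySem.Str.lower w ∈ qa.map PySem.Str.lower then acc ++ [w] else acc) m) := by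
  intro words
  induction words with
  | nil => intro c m; rfl
  | cons w ws ih =>
    intro c m
    simp only [List.foldl_cons, machingPairStep]
    have hc : PySem.Set.contains (PySem.Set.ofList (qa.map PySem.Str.lower)) (PySem.Str.lower w)
        = decide (PySem.Str.lower w ∈ qa.map PySem.Str.lower) := by
      simp [PySem.Set.mem_ofList]
    rw [hc]
    by_cases h : PySem.Str.lower w ∈ qa.map PySem.Str.lower <;> simp [h, ih]

-- B's final accumulator state, pair by pair
theorem maching_final_eq (user_words : List String) :
    ∀ (cp : List (List String)),
      user_words.foldl
          (machingAltUpdate (cp.map (fun qa => PySem.Set.ofList (qa.map PySem.Str.lower))))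
          (cp.map (fun _ => ((0 : Int), ([] : List String))))
        = cp.map (fun qa =>
            (user_words.foldl
              (fun acc w => if PySem.Str.lower w ∈ qa.map PySem.Str.lower then acc + 1 else acc) 0,
             user_words.foldl
              (fun acc w => if PySem.Str.lower w ∈ qa.map PySem.Str.lower then acc ++ [w] else acc) [])) := by
  intro cp
  induction cp with
  | nil => simpa using maching_fold_nil user_words
  | cons qa cp ih =>
    simp only [List.map_cons]
    rw [maching_fold_cons, ih, maching_pairstep_split]

-- A's first loop builds B's first dict
theorem maching_dict1_eq (user_words : List String) :
    ∀ (cp : List (List String)) (d : PySem.Dict Int Int) (i : Int),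
      (cp.foldl (machingStep1 user_words) (0, d, i)).2.1
        = ((cp.map (fun qa =>
            (user_words.foldl
              (fun acc w => if PySem.Str.lower w ∈ qa.map PySem.Str.lower then acc + 1 else acc) (0 : Int),
             user_words.foldl
              (fun acc w => if PySem.Str.lower w ∈ qa.map PySem.Str.lower then acc ++ [w] else acc) ([] : List String)))).foldl
            (fun (p : PySem.Dict Int Int × Int) cm => (p.1.insert p.2 cm.1, p.2 + 1)) (d, i)).1 := by
  intro cp
  induction cp with
  | nil => intro d i; rfl
  | cons qa cp ih =>
    intro d i
    simp only [List.map_cons, List.foldl_cons, machingStep1]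
    exact ih _ _

-- A's second loop builds B's second dict
theorem maching_dict2_eq (user_words : List String) :
    ∀ (cp : List (List String)) (d : PySem.Dict Int (List String)) (i : Int),
      (cp.foldl (machingStep2 user_words) (d, [], i)).1
        = ((cp.map (fun qa =>
            (user_words.foldl
              (fun acc w => if PySem.Str.lower w ∈ qa.map PySem.Str.lower then acc + 1 else acc) (0 : Int),
             user_words.foldl
              (fun acc w => if PySem.Str.lower w ∈ qa.map PySem.Str.lower then acc ++ [w] else acc) ([] : List String)))).foldl
            (fun (p : PySem.Dict Int (List String) × Int) cm => (p.1.insert p.2 cm.2, p.2 + 1)) (d, i)).1 := by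
  intro cp
  induction cp with
  | nil => intro d i; rfl
  | cons qa cp ih =>
    intro d i
    simp only [List.map_cons, List.foldl_cons, machingStep2]
    exact ih _ _

-- ===== VERDICT =====
theorem maching_spec : Claim_equal_maching := by
  intro combined_pair user_words _
  unfold Spec_maching maching maching_alt
  dsimp only
  rw [maching_final_eq user_words combined_pair]
  unfold machingAltDict1 machingAltDict2
  rw [maching_dict1_eq user_words combined_pair PySem.Dict.empty 1,
      maching_dict2_eq user_words combined_pair PySem.Dict.empty 1]
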